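-- pv_equiv track=rewrite | github.com/it-is-wanthefull/LInCodeList | 프로그래머스/4/17685. ［3차］ 자동완성/［3차］ 자동완성.py | solution
-- ===== SOURCE A (Python) =====
-- def solution(words):
--     answer = 0
--
--     root = {}
--     for word in words:
--         current_dict = root
--         for letter in word:
--             current_dict = current_dict.setdefault(letter, {})
--         current_dict["_end_"] = None
--
--     for word in words:
--         current = root
--         duplicated_pos = 0
--         for i, letter in enumerate(word):
--             current = current[letter]
--             if len(current) > 1:
--                 duplicated_pos = i + 1
--
--         if duplicated_pos == 0:
--             answer += 1
--         elif duplicated_pos < len(word):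
--             answer += duplicated_pos + 1
--         elif duplicated_pos == len(word):
--             answer += duplicated_pos
--
--     return answer
-- ===== SOURCE B (Python) =====
-- def solution(words):
--     # No trie: the presses for w are determined by the maximum LCP of w with
--     # any OTHER distinct word; compute that by direct pairwise comparison.
--     def lcp(a, b):
--         n = 0
--         for x, y in zip(a, b):
--             if x != y:
--                 break
--             n += 1
--         return n
--
--     distinct = set(words)
--     total = 0
--     for w in words:
--         m = 0
--         for u in distinct:
--             if u != w:
--                 k = lcp(w, u)
--                 if k > m:
--                     m = k
--         if m == 0:
--             total += 1
--         elif m == len(w):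
--             total += len(w)
--         else:
--             total += m + 1
--     return total
-- ===== Notes on version B (the rewrite author's own statement) =====
-- stated objective: alternative
-- what changed: Replaced the trie construction and per-word trie walk with a direct pairwise scan: for each word the maximum LCP with any other distinct word is computed by comparing strings, and the same three-branch key-press formula is applied.
import Mathlib
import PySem

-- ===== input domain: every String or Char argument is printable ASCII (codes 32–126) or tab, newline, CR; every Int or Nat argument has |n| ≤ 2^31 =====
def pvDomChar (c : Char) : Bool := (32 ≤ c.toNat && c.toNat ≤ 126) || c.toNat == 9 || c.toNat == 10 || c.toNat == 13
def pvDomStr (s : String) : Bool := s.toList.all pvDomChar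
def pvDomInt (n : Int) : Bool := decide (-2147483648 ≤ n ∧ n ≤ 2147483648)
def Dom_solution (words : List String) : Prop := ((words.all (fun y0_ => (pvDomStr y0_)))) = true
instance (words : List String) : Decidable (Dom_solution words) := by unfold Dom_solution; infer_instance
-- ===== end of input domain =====

-- B replaces A's trie with a pairwise max-LCP scan over the distinct words (alternative
-- decomposition, not claimed faster).

-- ===== PORT A =====
-- Python's trie is a nested dict whose keys are the child letters plus the sentinel "_end_";
-- ported as a mutual inductive: end-marker Bool + association list of children
-- (dict len = number of children + 1 if the end marker is present; letter lookup = key lookup).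
mutual
inductive PTrie where
  | mk : Bool → PChildren → PTrie
inductive PChildren where
  | nil : PChildren
  | cons : Char → PTrie → PChildren → PChildren
end

def PChildren.find? : PChildren → Char → Option PTrie
  | .nil, _ => none
  | .cons c t rest, a => if c = a then some t else rest.find? a

-- dict assignment: overwrite in place if the key exists, else append (Python insertion order)
def PChildren.set : PChildren → Char → PTrie → PChildren
  | .nil, a, x => .cons a x .nil
  | .cons c t rest, a, x => if c = a then .cons c x rest else .cons c t (rest.set a x)

def PChildren.len : PChildren → Nat
  | .nil => 0
  | .cons _ _ rest => rest.len + 1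

-- len(node dict) = children + end marker
def PTrie.size : PTrie → Nat
  | .mk e cs => cs.len + (if e then 1 else 0)

-- first loop body: descend with setdefault, then set the end marker
def insertW : List Char → PTrie → PTrie
  | [], .mk _ cs => .mk true cs
  | c :: r, .mk e cs =>
      .mk e (cs.set c (insertW r (match cs.find? c with
                                  | some t => t
                                  | none => .mk false .nil)))

-- second loop body: current = current[letter]; if len(current) > 1: duplicated_pos = i+1
def walkA : PTrie → List Char → Nat → Nat → Nat
  | _, [], _, dp => dp
  | .mk _ cs, c :: r, i, dp =>
      match cs.find? c with
      | some t => walkA t r (i + 1) (if 1 < t.size then i + 1 else dp)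
      | none => dp   -- unreachable: the word was inserted in the first loop (Python would KeyError)

def solution (words : List String) : Int :=
  let root := words.foldl (fun t w => insertW w.toList t) (.mk false .nil)
  words.foldl (fun ans w =>
    let dp := walkA root w.toList 0 0
    if dp = 0 then ans + 1
    else if dp < w.toList.length then ans + (dp : Int) + 1
    else if dp = w.toList.length then ans + (dp : Int)
    else ans) 0

-- ===== PORT B =====
def lcpLen : List Char → List Char → Nat
  | a :: as, b :: bs => if a = b then lcpLen as bs + 1 else 0
  | _, _ => 0

def solution_alt (words : List String) : Int :=
  let distinct := PySem.Set.ofList words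
  words.foldl (fun total w =>
    let m := distinct.foldl (fun m u =>
        if u ≠ w then (if m < lcpLen w.toList u.toList then lcpLen w.toList u.toList else m)
        else m) 0
    if m = 0 then total + 1
    else if m = w.toList.length then total + (m : Int)
    else total + (m : Int) + 1) 0

-- ===== PRECONDITION & SPEC =====
def Spec_solution (words : List String) (out : Int) : Prop := out = solution_alt words
instance (words : List String) (out : Int) : Decidable (Spec_solution words out) := by unfold Spec_solution; infer_instance

-- ===== CLAIM (what is proved, stated in full; the proofs are below) =====
def Claim_equal_solution : Prop := ∀ (words : List String), Dom_solution words → Spec_solution words (solution words)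

-- ===== LEMMAS AND PROOFS =====

-- ---- proof-only helpers: path semantics of the trie ----
def reach : PTrie → List Char → Option PTrie
  | t, [] => some t
  | .mk _ cs, c :: p =>
      match cs.find? c with
      | some t => reach t p
      | none => none

def PChildren.keys : PChildren → List Char
  | .nil => []
  | .cons c _ rest => c :: rest.keys

def endAt (t : PTrie) (p : List Char) : Bool :=
  match reach t p with
  | some (.mk e _) => e
  | none => false

def hasKey (t : PTrie) (p : List Char) (c : Char) : Bool :=
  match reach t p with
  | some (.mk _ cs) => (cs.find? c).isSome
  | none => false

def keysAt (t : PTrie) (p : List Char) : List Char :=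
  match reach t p with
  | some (.mk _ cs) => cs.keys
  | none => []

-- continuation x at node p: some c = child letter, none = end marker
def contA (t : PTrie) (p : List Char) (x : Option Char) : Prop :=
  match x with
  | some c => hasKey t p c = true
  | none => endAt t p = true

def Branch (t : PTrie) (p : List Char) : Prop :=
  ∃ x y : Option Char, x ≠ y ∧ contA t p x ∧ contA t p y

-- list-level continuation of S at path p
def ContS (S : List (List Char)) (p : List Char) (x : Option Char) : Prop :=
  ∃ v ∈ S, v.take p.length = p ∧ v[p.length]? = x

-- ---- basic children-list lemmas ----
theorem find?_set_self (cs : PChildren) (a : Char) (x : PTrie) :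
    (cs.set a x).find? a = some x := by
  fun_induction PChildren.set cs a x with
  | case1 => simp [PChildren.find?]
  | case2 => simp [PChildren.find?]
  | case3 c _ _ a _ h ih => simp [PChildren.find?, h, ih]

theorem find?_set_ne (cs : PChildren) (a b : Char) (x : PTrie) (h : b ≠ a) :
    (cs.set a x).find? b = cs.find? b := by
  fun_induction PChildren.set cs a x with
  | case1 => simp [PChildren.find?, Ne.symm h]
  | case2 => simp [PChildren.find?, Ne.symm h]
  | case3 c _ _ a _ hc ih => simp [PChildren.find?, ih h]

theorem keys_set (cs : PChildren) (a : Char) (x : PTrie) :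
    (cs.set a x).keys = if a ∈ cs.keys then cs.keys else cs.keys ++ [a] := by
  fun_induction PChildren.set cs a x with
  | case1 => simp [PChildren.keys]
  | case2 => simp [PChildren.keys]
  | case3 c _ _ a _ hc ih =>
    have : ¬ (a = c) := fun hh => hc hh.symm
    simp only [PChildren.keys, ih, List.mem_cons, this, false_or]
    split <;> simp

theorem len_eq_keys_length (cs : PChildren) : cs.len = cs.keys.length := by
  fun_induction PChildren.len cs with
  | case1 => rfl
  | case2 _ _ _ ih => simp [PChildren.keys, ih]

theorem find?_isSome_iff_mem (cs : PChildren) (a : Char) :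
    (cs.find? a).isSome = true ↔ a ∈ cs.keys := by
  fun_induction PChildren.find? cs a with
  | case1 => simp [PChildren.keys]
  | case2 => simp [PChildren.keys]
  | case3 c _ _ a hc ih => simp [PChildren.keys, ih, Ne.symm hc]

-- ---- effect of one insert on the path observables ----
theorem endAt_cons (e : Bool) (cs : PChildren) (a : Char) (p : List Char) :
    endAt (.mk e cs) (a :: p) = (cs.find? a).elim false (endAt · p) := by
  cases h : cs.find? a <;> simp [endAt, reach, h]

theorem hasKey_cons (e : Bool) (cs : PChildren) (a : Char) (p : List Char) (c : Char) :
    hasKey (.mk e cs) (a :: p) c = (cs.find? a).elim false (hasKey · p c) := by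
  cases h : cs.find? a <;> simp [hasKey, reach, h]

theorem keysAt_cons (e : Bool) (cs : PChildren) (a : Char) (p : List Char) :
    keysAt (.mk e cs) (a :: p) = (cs.find? a).elim [] (keysAt · p) := by
  cases h : cs.find? a <;> simp [keysAt, reach, h]

theorem keysAt_empty (p : List Char) : keysAt (.mk false .nil) p = [] := by
  cases p <;> simp [keysAt, reach, PChildren.find?, PChildren.keys]

theorem endAt_empty (p : List Char) : endAt (.mk false .nil) p = false := by
  cases p <;> simp [endAt, reach, PChildren.find?]

theorem hasKey_empty (p : List Char) (c : Char) : hasKey (.mk false .nil) p c = false := by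
  cases p <;> simp [hasKey, reach, PChildren.find?]

theorem endAt_insert (u : List Char) (t : PTrie) (p : List Char) :
    endAt (insertW u t) p = (decide (p = u) || endAt t p) := by
  induction p generalizing u t with
  | nil =>
    obtain ⟨e, cs⟩ := t
    cases u with
    | nil => simp [insertW, endAt, reach]
    | cons c r => simp [insertW, endAt, reach]
  | cons a p' ih =>
    obtain ⟨e, cs⟩ := t
    cases u with
    | nil => simp [insertW, endAt_cons]
    | cons c r =>
      by_cases hac : a = c
      · subst hac
        rw [insertW]
        rw [endAt_cons, find?_set_self, Option.elim_some, ih]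
        rw [endAt_cons]
        cases h : cs.find? a with
        | some t0 => simp
        | none => simp [endAt_empty]
      · rw [insertW]
        rw [endAt_cons, find?_set_ne _ _ _ _ hac, endAt_cons]
        simp [hac]

theorem hasKey_insert (u : List Char) (t : PTrie) (p : List Char) (c : Char) :
    hasKey (insertW u t) p c = (decide ((p ++ [c]) <+: u) || hasKey t p c) := by
  induction p generalizing u t with
  | nil =>
    obtain ⟨e, cs⟩ := t
    cases u with
    | nil => simp [insertW, hasKey, reach]
    | cons c' r =>
      by_cases hcc : c = c'
      · subst hcc
        simp [insertW, hasKey, reach, find?_set_self]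
      · simp [insertW, hasKey, reach, find?_set_ne _ _ _ _ hcc, hcc, List.cons_prefix_cons]
  | cons a p' ih =>
    obtain ⟨e, cs⟩ := t
    cases u with
    | nil => simp [insertW, hasKey_cons]
    | cons c' r =>
      by_cases hac : a = c'
      · subst hac
        rw [insertW]
        rw [hasKey_cons, find?_set_self, Option.elim_some, ih]
        rw [hasKey_cons]
        cases h : cs.find? a with
        | some t0 => simp [List.cons_prefix_cons]
        | none => simp [hasKey_empty, List.cons_prefix_cons]
      · rw [insertW]
        rw [hasKey_cons, find?_set_ne _ _ _ _ hac, hasKey_cons]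
        simp [List.cons_prefix_cons, hac]

theorem nodup_keysAt_insert (u : List Char) (t : PTrie)
    (h : ∀ p, (keysAt t p).Nodup) : ∀ p, (keysAt (insertW u t) p).Nodup := by
  induction u generalizing t with
  | nil =>
    intro p
    obtain ⟨e, cs⟩ := t
    cases p with
    | nil => simpa [insertW, keysAt, reach] using h []
    | cons a p' =>
      have := h (a :: p')
      rw [keysAt_cons] at this
      rw [insertW, keysAt_cons]
      exact this
  | cons c r ih =>
    intro p
    obtain ⟨e, cs⟩ := t
    cases p with
    | nil =>
      have h0 := h []
      rw [insertW]
      show ((cs.set c _).keys).Nodup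
      rw [keys_set]
      have h0' : cs.keys.Nodup := by simpa [keysAt, reach] using h0
      split
      · exact h0'
      · rename_i hmem
        simp only [List.nodup_append, List.nodup_cons, List.nodup_nil, and_true]
        refine ⟨h0', by simp, ?_⟩
        intro x hx b hb
        simp at hb
        subst hb
        intro hx'
        subst hx'
        exact hmem hx
    | cons a p' =>
      by_cases hac : a = c
      · subst hac
        rw [insertW, keysAt_cons, find?_set_self, Option.elim_some]
        apply ih
        intro q
        cases hf : cs.find? a with
        | some t0 =>
          have := h (a :: q)
          rw [keysAt_cons, hf, Option.elim_some] at this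
          simpa [hf] using this
        | none => simp [keysAt_empty]
      · rw [insertW, keysAt_cons, find?_set_ne _ _ _ _ hac]
        have := h (a :: p')
        rw [keysAt_cons] at this
        exact this

-- ---- the built trie ----
theorem endAt_build (S : List (List Char)) (t : PTrie) (p : List Char) :
    endAt (S.foldl (fun t u => insertW u t) t) p = (decide (p ∈ S) || endAt t p) := by
  induction S generalizing t with
  | nil => simp
  | cons u S ih =>
    simp only [List.foldl_cons, ih, endAt_insert, List.mem_cons]
    cases hd : decide (p = u) <;> simp_all

theorem hasKey_build (S : List (List Char)) (t : PTrie) (p : List Char) (c : Char) :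
    hasKey (S.foldl (fun t u => insertW u t) t) p c
      = (decide (∃ u ∈ S, (p ++ [c]) <+: u) || hasKey t p c) := by
  induction S generalizing t with
  | nil => simp
  | cons u S ih =>
    simp only [List.foldl_cons, ih, hasKey_insert, List.mem_cons]
    cases hd : decide ((p ++ [c]) <+: u) <;> simp_all

theorem nodup_keysAt_build (S : List (List Char)) (p : List Char) :
    (keysAt (S.foldl (fun t u => insertW u t) (.mk false .nil)) p).Nodup := by
  have : ∀ (t : PTrie), (∀ q, (keysAt t q).Nodup) →
      ∀ q, (keysAt (S.foldl (fun t u => insertW u t) t) q).Nodup := by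
    induction S with
    | nil => intro t ht q; simpa using ht q
    | cons u S ih =>
      intro t ht q
      exact ih (insertW u t) (nodup_keysAt_insert u t ht) q
  exact this _ (fun q => by simp [keysAt_empty]) p

theorem prefix_snoc_iff (p : List Char) (c : Char) (v : List Char) :
    (p ++ [c]) <+: v ↔ (v.take p.length = p ∧ v[p.length]? = some c) := by
  induction p generalizing v with
  | nil =>
    cases v with
    | nil => simp
    | cons y vs => simp [List.cons_prefix_cons, eq_comm]
  | cons a p' ih =>
    cases v with
    | nil => simp
    | cons y vs =>
      simp [List.cons_prefix_cons, ih vs, eq_comm (a := y) (b := a), and_assoc]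

theorem eq_iff_take_get_none (p v : List Char) :
    v = p ↔ (v.take p.length = p ∧ v[p.length]? = none) := by
  constructor
  · rintro rfl
    simp
  · rintro ⟨h1, h2⟩
    rw [List.getElem?_eq_none_iff] at h2
    rw [← h1]
    exact (List.take_of_length_le h2).symm

theorem contA_build (S : List (List Char)) (p : List Char) (x : Option Char) :
    contA (S.foldl (fun t u => insertW u t) (.mk false .nil)) p x ↔ ContS S p x := by
  cases x with
  | some c =>
    show hasKey _ p c = true ↔ _
    rw [hasKey_build, hasKey_empty]
    simp only [Bool.or_false, decide_eq_true_eq, ContS]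
    exact exists_congr fun v => and_congr_right fun _ => prefix_snoc_iff p c v
  | none =>
    show endAt _ p = true ↔ _
    rw [endAt_build, endAt_empty]
    simp only [Bool.or_false, decide_eq_true_eq, ContS]
    constructor
    · intro hp
      exact ⟨p, hp, by simp⟩
    · rintro ⟨v, hv, h1, h2⟩
      rwa [(eq_iff_take_get_none p v).2 ⟨h1, h2⟩] at hv

-- ---- node size vs branching ----
theorem size_gt_one_iff (t : PTrie) (p : List Char) (n : PTrie)
    (hr : reach t p = some n) (hnd : (keysAt t p).Nodup) :
    1 < n.size ↔ Branch t p := by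
  obtain ⟨e, cs⟩ := n
  have hkeys : keysAt t p = cs.keys := by simp [keysAt, hr]
  have hhk : ∀ c, hasKey t p c = (cs.find? c).isSome := by intro c; simp [hasKey, hr]
  have hend : endAt t p = e := by simp [endAt, hr]
  rw [hkeys] at hnd
  constructor
  · intro hsz
    simp only [PTrie.size, len_eq_keys_length] at hsz
    cases e with
    | true =>
      have hlen : 0 < cs.keys.length := by by_contra hh; simp at hh; simp [hh] at hsz
      obtain ⟨k, hk⟩ := List.exists_mem_of_length_pos hlen
      refine ⟨none, some k, by simp, ?_, ?_⟩
      · show endAt t p = true; rw [hend]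
      · show hasKey t p k = true
        rw [hhk]; exact (find?_isSome_iff_mem cs k).2 hk
    | false =>
      simp only [Bool.false_eq_true, if_false, add_zero] at hsz
      cases hK : cs.keys with
      | nil => rw [hK] at hsz; simp at hsz
      | cons k1 ks =>
        cases hks : ks with
        | nil => rw [hK, hks] at hsz; simp at hsz
        | cons k2 ks' =>
          have hne : k1 ≠ k2 := by
            rw [hK, hks] at hnd
            intro hh
            exact (List.nodup_cons.1 hnd).1 (by rw [hh]; simp)
          refine ⟨some k1, some k2, by simp [hne], ?_, ?_⟩
          · show hasKey t p k1 = true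
            rw [hhk]; exact (find?_isSome_iff_mem cs k1).2 (by rw [hK]; simp)
          · show hasKey t p k2 = true
            rw [hhk]; exact (find?_isSome_iff_mem cs k2).2 (by rw [hK, hks]; simp)
  · rintro ⟨x, y, hxy, hx, hy⟩
    simp only [PTrie.size, len_eq_keys_length]
    have hmem : ∀ c : Char, contA t p (some c) → c ∈ cs.keys := by
      intro c hc
      have : hasKey t p c = true := hc
      rw [hhk] at this
      exact (find?_isSome_iff_mem cs c).1 this
    cases x with
    | none =>
      cases y with
      | none => exact absurd rfl hxy
      | some c =>
        have he : e = true := by have : endAt t p = true := hx; rwa [hend] at this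
        have : c ∈ cs.keys := hmem c hy
        have : 0 < cs.keys.length := List.length_pos_of_mem this
        simp [he]; omega
    | some c1 =>
      cases y with
      | none =>
        have he : e = true := by have : endAt t p = true := hy; rwa [hend] at this
        have : 0 < cs.keys.length := List.length_pos_of_mem (hmem c1 hx)
        simp [he]; omega
      | some c2 =>
        have hc12 : c1 ≠ c2 := by intro hh; exact hxy (by rw [hh])
        have h1 : c1 ∈ cs.keys := hmem c1 hx
        have h2 : c2 ∈ cs.keys := hmem c2 hy
        have : 1 < cs.keys.length := by
          cases hK : cs.keys with
          | nil => rw [hK] at h1; simp at h1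
          | cons k ks =>
            cases hks : ks with
            | nil =>
              rw [hK, hks] at h1 h2
              simp at h1 h2
              exact absurd (h1.trans h2.symm) hc12
            | cons k2 ks' => simp
        have hok : 1 < cs.keys.length + (if e then 1 else 0) := by split <;> omega
        exact hok

-- ---- lcp lemmas ----
theorem lcpLen_le_left (a b : List Char) : lcpLen a b ≤ a.length := by
  induction a generalizing b with
  | nil => simp [lcpLen]
  | cons x as ih =>
    cases b with
    | nil => simp [lcpLen]
    | cons y bs =>
      by_cases h : x = y
      · simpa [lcpLen, h] using ih bs
      · simp [lcpLen, h]

theorem take_lcpLen_eq (a b : List Char) : a.take (lcpLen a b) = b.take (lcpLen a b) := by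
  induction a generalizing b with
  | nil => simp [lcpLen]
  | cons x as ih =>
    cases b with
    | nil => simp [lcpLen]
    | cons y bs =>
      by_cases h : x = y
      · simp [lcpLen, h, ih bs]
      · simp [lcpLen, h]

theorem lcpLen_eq_of (d : Nat) (a b : List Char)
    (ht : a.take d = b.take d) (hne : a[d]? ≠ b[d]?) : lcpLen a b = d := by
  induction d generalizing a b with
  | zero =>
    cases a with
    | nil => cases b <;> simp_all [lcpLen]
    | cons x as =>
      cases b with
      | nil => simp [lcpLen]
      | cons y bs =>
        have : x ≠ y := by simpa using hne
        simp [lcpLen, this]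
  | succ d ih =>
    cases a with
    | nil => simp at ht; simp [← ht] at hne
    | cons x as =>
      cases b with
      | nil => simp at ht
      | cons y bs =>
        simp only [List.take_succ_cons, List.cons.injEq] at ht
        obtain ⟨hx, ht'⟩ := ht
        subst hx
        simp only [List.getElem?_cons_succ] at hne
        simp [lcpLen, ih as bs ht' hne]

theorem getElem?_lcpLen_ne (a b : List Char) (h : a ≠ b) :
    a[lcpLen a b]? ≠ b[lcpLen a b]? := by
  induction a generalizing b with
  | nil =>
    cases b with
    | nil => exact absurd rfl h
    | cons y bs => simp [lcpLen]
  | cons x as ih =>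
    cases b with
    | nil => simp [lcpLen]
    | cons y bs =>
      by_cases hxy : x = y
      · subst hxy
        have hne : as ≠ bs := by intro hh; exact h (by rw [hh])
        simpa [lcpLen] using ih bs hne
      · simp [lcpLen, hxy]

-- ---- Branch ↔ lcp witness ----
theorem branch_iff_lcp (S : List (List Char)) (w : List Char) (hw : w ∈ S)
    (d : Nat) (_h1 : 1 ≤ d) (hd : d ≤ w.length) :
    Branch (S.foldl (fun t u => insertW u t) (.mk false .nil)) (w.take d)
      ↔ ∃ u ∈ S, u ≠ w ∧ lcpLen w u = d := by
  have hp : (w.take d).length = d := by simp [List.length_take]; omega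
  have hC : ∀ x, ContS S (w.take d) x ↔ ∃ v ∈ S, v.take d = w.take d ∧ v[d]? = x := by
    intro x; simp only [ContS, hp]
  constructor
  · rintro ⟨x, y, hxy, hx, hy⟩
    rw [contA_build, hC] at hx hy
    obtain ⟨v1, hv1, ht1, hg1⟩ := hx
    obtain ⟨v2, hv2, ht2, hg2⟩ := hy
    by_cases h1eq : v1[d]? = w[d]?
    · have h2ne : v2[d]? ≠ w[d]? := by
        rw [hg1, hg2] at *
        intro hh; exact hxy (h1eq.symm ▸ hh ▸ rfl)
      refine ⟨v2, hv2, ?_, ?_⟩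
      · intro hh; subst hh; exact h2ne rfl
      · exact lcpLen_eq_of d w v2 ht2.symm (fun hh => h2ne (hh.symm))
    · refine ⟨v1, hv1, ?_, ?_⟩
      · intro hh; subst hh; exact h1eq rfl
      · exact lcpLen_eq_of d w v1 ht1.symm (fun hh => h1eq (hh.symm))
  · rintro ⟨u, hu, hne, hl⟩
    have hwu : w ≠ u := fun hh => hne hh.symm
    have hgne : w[d]? ≠ u[d]? := by
      have := getElem?_lcpLen_ne w u hwu
      rwa [hl] at this
    have htke : w.take d = u.take d := by
      have := take_lcpLen_eq w u
      rwa [hl] at this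
    refine ⟨w[d]?, u[d]?, hgne, ?_, ?_⟩
    · rw [contA_build, hC]; exact ⟨w, hw, rfl, rfl⟩
    · rw [contA_build, hC]; exact ⟨u, hu, htke.symm, rfl⟩

-- ---- walk characterisation ----
theorem reach_append (t : PTrie) (p q : List Char) :
    reach t (p ++ q) = (reach t p).bind (fun t' => reach t' q) := by
  induction p generalizing t with
  | nil => simp [reach]
  | cons a p' ih =>
    obtain ⟨e, cs⟩ := t
    cases h : cs.find? a with
    | some t0 => simp [reach, h, ih]
    | none => simp [reach, h]

theorem walkA_spec (S : List (List Char)) (w : List Char) (hw : w ∈ S) :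
    ∀ (r : List Char) (i dp : Nat) (tn : PTrie), w.drop i = r → dp ≤ i → i ≤ w.length →
    reach (S.foldl (fun t u => insertW u t) (.mk false .nil)) (w.take i) = some tn →
    dp ≤ walkA tn r i dp ∧
    (walkA tn r i dp = dp ∨ (i < walkA tn r i dp ∧ walkA tn r i dp ≤ w.length ∧
        Branch (S.foldl (fun t u => insertW u t) (.mk false .nil)) (w.take (walkA tn r i dp)))) ∧
    (∀ d, i < d → d ≤ w.length →
        Branch (S.foldl (fun t u => insertW u t) (.mk false .nil)) (w.take d) →
        d ≤ walkA tn r i dp) := by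
  intro r
  induction r with
  | nil =>
    intro i dp tn hdrop hdp hi hreach
    have hlen : w.length ≤ i := by
      have := congrArg List.length hdrop
      simp at this
      omega
    refine ⟨le_refl _, Or.inl rfl, ?_⟩
    intro d hd1 hd2 _
    omega
  | cons c r' ih =>
    intro i dp tn hdrop hdp hi hreach
    have hilen : i < w.length := by
      have := congrArg List.length hdrop
      simp at this
      omega
    have hwc : w[i]? = some c := by
      have h0 : (w.drop i)[0]? = some c := by rw [hdrop]; rfl
      rwa [List.getElem?_drop] at h0
    have hdrop' : w.drop (i + 1) = r' := by
      rw [← List.tail_drop, hdrop]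
      rfl
    have htake' : w.take (i + 1) = w.take i ++ [c] := by
      rw [List.take_add_one, hwc]
      rfl
    obtain ⟨e, cs⟩ := tn
    have hk : (cs.find? c).isSome = true := by
      have hhk : hasKey (S.foldl (fun t u => insertW u t) (.mk false .nil)) (w.take i) c
          = (cs.find? c).isSome := by simp [hasKey, hreach]
      rw [← hhk, hasKey_build]
      have : (w.take i ++ [c]) <+: w := by rw [← htake']; exact List.take_prefix _ _
      simp
      exact Or.inl ⟨w, hw, this⟩
    obtain ⟨t', hf⟩ := Option.isSome_iff_exists.1 hk
    have hreach' : reach (S.foldl (fun t u => insertW u t) (.mk false .nil)) (w.take (i + 1))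
        = some t' := by
      rw [htake', reach_append, hreach]
      simp [reach, hf]
    have hBr : 1 < t'.size ↔
        Branch (S.foldl (fun t u => insertW u t) (.mk false .nil)) (w.take (i + 1)) :=
      size_gt_one_iff _ _ _ hreach' (nodup_keysAt_build S _)
    have hstep : walkA (.mk e cs) (c :: r') i dp
        = walkA t' r' (i + 1) (if 1 < t'.size then i + 1 else dp) := by
      simp [walkA, hf]
    rw [hstep]
    set dp' := if 1 < t'.size then i + 1 else dp with hdp'
    have hdple : dp ≤ dp' ∧ dp' ≤ i + 1 := by
      rw [hdp']; split <;> omega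
    obtain ⟨H1, H2, H3⟩ := ih (i + 1) dp' t' hdrop' hdple.2 (by omega) hreach'
    refine ⟨by omega, ?_, ?_⟩
    · rcases H2 with H2 | H2
      · by_cases hsz : 1 < t'.size
        · right
          have : dp' = i + 1 := by rw [hdp', if_pos hsz]
          rw [H2, this]
          exact ⟨by omega, by omega, hBr.1 hsz⟩
        · left
          rw [H2, hdp', if_neg hsz]
      · right
        exact ⟨by omega, H2.2.1, H2.2.2⟩
    · intro d hd1 hd2 hBrd
      by_cases hdi : d = i + 1
      · subst hdi
        have hsz : 1 < t'.size := hBr.2 hBrd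
        have : dp' = i + 1 := by rw [hdp', if_pos hsz]
        omega
      · exact H3 d (by omega) hd2 hBrd

-- ---- B's inner fold characterisation ----
theorem mfold_spec (w : String) (L : List String) : ∀ (acc : Nat),
    acc ≤ L.foldl (fun m u =>
        if u ≠ w then (if m < lcpLen w.toList u.toList then lcpLen w.toList u.toList else m)
        else m) acc ∧
    (L.foldl (fun m u =>
        if u ≠ w then (if m < lcpLen w.toList u.toList then lcpLen w.toList u.toList else m)
        else m) acc = acc ∨ ∃ u ∈ L, u ≠ w ∧ lcpLen w.toList u.toList = L.foldl (fun m u =>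
        if u ≠ w then (if m < lcpLen w.toList u.toList then lcpLen w.toList u.toList else m)
        else m) acc) ∧
    (∀ u ∈ L, u ≠ w → lcpLen w.toList u.toList ≤ L.foldl (fun m u =>
        if u ≠ w then (if m < lcpLen w.toList u.toList then lcpLen w.toList u.toList else m)
        else m) acc) := by
  induction L with
  | nil => intro acc; simp
  | cons v L ih =>
    intro acc
    simp only [List.foldl_cons]
    set acc' := if v ≠ w then (if acc < lcpLen w.toList v.toList then lcpLen w.toList v.toList else acc) else acc with hacc'
    obtain ⟨H1, H2, H3⟩ := ih acc'
    have hle : acc ≤ acc' := by rw [hacc']; split <;> [skip; omega]; split <;> omega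
    refine ⟨by omega, ?_, ?_⟩
    · rcases H2 with H2 | H2
      · rw [H2, hacc']
        by_cases hvw : v = w
        · left; simp [hvw]
        · by_cases hlt : acc < lcpLen w.toList v.toList
          · right
            exact ⟨v, by simp, hvw, by simp [hvw, hlt]⟩
          · left; simp [hvw, hlt]
      · right
        obtain ⟨u, hu, hne, heq⟩ := H2
        exact ⟨u, by simp [hu], hne, heq⟩
    · intro u hu hne
      rcases List.mem_cons.1 hu with rfl | hu'
      · have h' : lcpLen w.toList u.toList ≤ acc' := by
          rw [hacc', if_pos hne]
          split <;> omega
        exact le_trans h' H1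
      · exact H3 u hu' hne

-- ---- per-word equality ----
theorem per_word (words : List String) (w : String) (hw : w ∈ words) :
    walkA (words.foldl (fun t w => insertW w.toList t) (.mk false .nil)) w.toList 0 0
      = (PySem.Set.ofList words).foldl (fun m u =>
          if u ≠ w then (if m < lcpLen w.toList u.toList then lcpLen w.toList u.toList else m)
          else m) 0 := by
  have hfold : words.foldl (fun t w => insertW w.toList t) (.mk false .nil)
      = (words.map String.toList).foldl (fun t u => insertW u t) (.mk false .nil) := by
    rw [List.foldl_map]
  have hwS : w.toList ∈ words.map String.toList := List.mem_map_of_mem hw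
  have htr : ∀ d, (∃ u ∈ words.map String.toList, u ≠ w.toList ∧ lcpLen w.toList u = d)
      ↔ (∃ u ∈ PySem.Set.ofList words, u ≠ w ∧ lcpLen w.toList u.toList = d) := by
    intro d
    constructor
    · rintro ⟨u, hu, hne, hl⟩
      obtain ⟨u', hu', rfl⟩ := List.mem_map.1 hu
      refine ⟨u', (PySem.Set.mem_ofList words u').2 hu', ?_, hl⟩
      intro hh; exact hne (by rw [hh])
    · rintro ⟨u, hu, hne, hl⟩
      refine ⟨u.toList, List.mem_map_of_mem ((PySem.Set.mem_ofList words u).1 hu), ?_, hl⟩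
      intro hh; exact hne (String.toList_inj.mp hh)
  rw [hfold]
  obtain ⟨H1, H2, H3⟩ := walkA_spec (words.map String.toList) w.toList hwS
    w.toList 0 0
    ((words.map String.toList).foldl (fun t u => insertW u t) (.mk false .nil))
    List.drop_zero (le_refl 0) (Nat.zero_le _) (by simp [reach])
  obtain ⟨M1, M2, M3⟩ := mfold_spec w (PySem.Set.ofList words) 0
  set D := walkA ((words.map String.toList).foldl (fun t u => insertW u t) (.mk false .nil))
      w.toList 0 0 with hD
  set m := (PySem.Set.ofList words).foldl (fun m u =>
      if u ≠ w then (if m < lcpLen w.toList u.toList then lcpLen w.toList u.toList else m)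
      else m) 0 with hm
  apply Nat.le_antisymm
  · rcases H2 with H2 | ⟨hD1, hD2, hBr⟩
    · omega
    · have := (branch_iff_lcp (words.map String.toList) w.toList hwS D hD1 hD2).1 hBr
      obtain ⟨u, hu, hne, hl⟩ := (htr D).1 this
      exact hl ▸ M3 u hu hne
  · rcases M2 with M2 | ⟨u, hu, hne, hl⟩
    · omega
    · by_cases hm0 : m = 0
      · omega
      · have hm1 : 1 ≤ m := by omega
        have hmlen : m ≤ w.toList.length := hl ▸ lcpLen_le_left _ _
        have hBr := (branch_iff_lcp (words.map String.toList) w.toList hwS m hm1 hmlen).2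
          ((htr m).2 ⟨u, hu, hne, hl⟩)
        exact H3 m (by omega) hmlen hBr

-- ===== VERDICT (by name: the statement is the Claim_ definition above) =====
theorem m_le_len (words : List String) (w : String) :
    (PySem.Set.ofList words).foldl (fun m u =>
        if u ≠ w then (if m < lcpLen w.toList u.toList then lcpLen w.toList u.toList else m)
        else m) 0 ≤ w.toList.length := by
  obtain ⟨_, M2, _⟩ := mfold_spec w (PySem.Set.ofList words) 0
  rcases M2 with M2 | ⟨u, _, _, hl⟩
  · omega
  · exact hl ▸ lcpLen_le_left _ _

theorem solution_spec : Claim_equal_solution := by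
  intro words _hdom
  show solution words = solution_alt words
  unfold solution solution_alt
  simp only
  apply PySem.List.foldl_congr_mem
  intro acc w hw
  rw [per_word words w hw]
  set m := (PySem.Set.ofList words).foldl (fun m u =>
      if u ≠ w then (if m < lcpLen w.toList u.toList then lcpLen w.toList u.toList else m)
      else m) 0 with hm
  have hlen : m ≤ w.toList.length := m_le_len words w
  by_cases h0 : m = 0
  · simp [h0]
  · by_cases he : m = w.toList.length
    · rw [if_neg h0, if_neg (by omega), if_pos he, if_neg h0, if_pos he]
    · rw [if_neg h0, if_pos (by omega), if_neg h0, if_neg he]
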